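-- pv_equiv track=rewrite | github.com/shaox192/NeuralGuidance | analysis/noise_ceiling.py | get_repeated_image
-- ===== SOURCE A (Python) =====
-- def get_repeated_image(full_beta_data, ordering):
--
--     # ---- find images that repeated
--     unique_img_dict = {}
--     for trial_id in range(len(ordering)):
--         img_id = ordering[trial_id]
--         if img_id not in unique_img_dict:
--             unique_img_dict[img_id] = [trial_id]
--         else:
--             unique_img_dict[img_id].append(trial_id)
--
--     use_dict = {k: v for k, v in unique_img_dict.items() if len(v) == 3}  # WE ONLY USE IMAGES WITH 3 reps for this!!
--     return use_dict
-- ===== SOURCE B (Python) =====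
-- def get_repeated_image(full_beta_data, ordering):
--     # Per-distinct-image scan: for each distinct image id (first-occurrence order),
--     # collect its trial indices by scanning the ordering; keep only triples.
--     result = {}
--     for img in dict.fromkeys(ordering):
--         idxs = [i for i, x in enumerate(ordering) if x == img]
--         if len(idxs) == 3:
--             result[img] = idxs
--     return result
-- ===== Notes on version B (the rewrite author's own statement) =====
-- stated objective: alternative
-- what changed: Replaces the single-pass incremental hash grouping with a per-distinct-image scan: dedup the ordering once, then for each distinct image collect its indices with an enumerate-filter comprehension and keep it only if it has exactly 3 occurrences.
import Mathlib
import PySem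

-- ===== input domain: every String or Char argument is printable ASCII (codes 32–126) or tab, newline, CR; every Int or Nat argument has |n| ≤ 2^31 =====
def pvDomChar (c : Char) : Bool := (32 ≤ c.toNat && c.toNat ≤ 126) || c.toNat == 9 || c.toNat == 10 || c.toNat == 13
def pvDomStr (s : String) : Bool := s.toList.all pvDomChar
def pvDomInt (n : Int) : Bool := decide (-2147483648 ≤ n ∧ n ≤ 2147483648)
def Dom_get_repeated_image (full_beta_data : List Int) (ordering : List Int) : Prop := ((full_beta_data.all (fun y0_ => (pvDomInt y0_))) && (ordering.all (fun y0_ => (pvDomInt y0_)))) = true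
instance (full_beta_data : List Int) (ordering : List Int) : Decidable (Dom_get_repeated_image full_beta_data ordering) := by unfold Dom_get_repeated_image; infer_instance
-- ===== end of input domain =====

-- B groups trial indices per distinct image by scanning the ordering once per distinct
-- image (dedup + enumerate-filter) instead of A's single-pass incremental dict grouping;
-- objective: alternative decomposition (not faster).

-- ===== PORT A =====
def get_repeated_image (full_beta_data : List Int) (ordering : List Int) : List (Int × List Int) :=
  -- for trial_id in range(len(ordering)): group trial_id under ordering[trial_id]
  let unique_img_dict : PySem.Dict Int (List Int) :=
    (PySem.List.pyRange 0 (PySem.List.len ordering) 1).foldl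
      (fun d trial_id =>
        let img_id := PySem.List.pyGetD ordering trial_id 0
        if d.contains img_id = false then d.insert img_id [trial_id]
        else d.modify img_id [] (fun v => v ++ [trial_id]))
      PySem.Dict.empty
  -- {k: v for k, v in unique_img_dict.items() if len(v) == 3}
  unique_img_dict.items.filter (fun kv => kv.2.length == 3)

-- ===== PORT B =====
def get_repeated_image_alt (full_beta_data : List Int) (ordering : List Int) : List (Int × List Int) :=
  ((PySem.List.dedup ordering).foldl
    (fun r img =>
      let idxs := ((PySem.List.enumerate ordering 0).filter (fun p => p.2 == img)).map (fun p => p.1)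
      if idxs.length == 3 then r.insert img idxs else r)
    (PySem.Dict.empty : PySem.Dict Int (List Int))).items

-- ===== PRECONDITION & SPEC =====
def Spec_get_repeated_image (full_beta_data : List Int) (ordering : List Int) (out : List (Int × List Int)) : Prop := out = get_repeated_image_alt full_beta_data ordering
instance (full_beta_data : List Int) (ordering : List Int) (out : List (Int × List Int)) : Decidable (Spec_get_repeated_image full_beta_data ordering out) := by unfold Spec_get_repeated_image; infer_instance

-- ===== CLAIM (what is proved, stated in full; the proofs are below) =====
def Claim_equal_get_repeated_image : Prop := ∀ (full_beta_data : List Int) (ordering : List Int), Dom_get_repeated_image full_beta_data ordering → Spec_get_repeated_image full_beta_data ordering (get_repeated_image full_beta_data ordering)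

-- ===== LEMMAS AND PROOFS =====

-- A's step (first-occurrence insert / append) is exactly a `modify` with default [].
theorem pv_step_eq (d : PySem.Dict Int (List Int)) (img t : Int) :
    (if d.contains img = false then d.insert img [t]
     else d.modify img [] (fun v => v ++ [t])) = d.modify img [] (fun v => v ++ [t]) := by
  by_cases h : d.contains img = false
  · simp only [h, if_true]
    show d.insert img [t] = d.insert img (d.getD img [] ++ [t])
    rw [PySem.Dict.getD_of_not_contains] <;> simp [h]
  · simp [h]

-- Fold over range(len(xs)) with xs[i] = fold over enumerate(xs).
theorem pv_foldl_range_enum {σ : Type} (f : σ → Int → Int → σ) :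
    ∀ (ys : List Int) (s : Int) (g : Int → Int) (a : σ),
      (∀ k : Nat, k < ys.length → ∀ (hk : k < ys.length), g (s + (k : Int)) = ys[k]'hk) →
      (PySem.List.pyRange s (s + (ys.length : Int)) 1).foldl (fun a i => f a i (g i)) a
        = (PySem.List.enumerate ys s).foldl (fun a p => f a p.1 p.2) a := by
  intro ys
  induction ys with
  | nil => intro s g a _; simp [PySem.List.pyRange_one_eq_nil, PySem.List.enumerate_nil]
  | cons y ys ih =>
    intro s g a h
    have h1 : s < s + ((y :: ys).length : Int) := by
      simp only [List.length_cons, Nat.cast_add, Nat.cast_one]; omega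
    rw [PySem.List.pyRange_one_cons h1, PySem.List.enumerate_cons]
    simp only [List.foldl_cons]
    have hg0 : g s = y := by
      have := h 0 (by simp) (by simp)
      simpa using this
    rw [hg0]
    have harith : s + ((y :: ys).length : Int) = (s + 1) + (ys.length : Int) := by
      simp only [List.length_cons, Nat.cast_add, Nat.cast_one]; omega
    rw [harith]
    exact ih (s + 1) g (f a s y) (by
      intro k hk hk'
      have := h (k + 1) (by simpa using Nat.succ_lt_succ hk) (by simpa using Nat.succ_lt_succ hk)
      have e : s + 1 + (k : Int) = s + ((k : Int) + 1) := by ring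
      rw [e]
      simpa using this)

-- B's fold over distinct fresh keys appends the filtered pairs.
theorem pv_b_items (p : Int → Bool) (v : Int → List Int) :
    ∀ (l : List Int), l.Nodup → ∀ (d : PySem.Dict Int (List Int)),
      d.keys.Nodup → (∀ k ∈ l, d.contains k = false) →
      (l.foldl (fun r img => if p img then r.insert img (v img) else r) d).items
        = d.items ++ (l.filter p).map (fun k => (k, v k)) := by
  intro l
  induction l with
  | nil => intro _ d _ _; simp
  | cons k l ih =>
    intro hnd d hdk hfresh
    have hkl : k ∉ l := (List.nodup_cons.mp hnd).1
    have hlnd : l.Nodup := (List.nodup_cons.mp hnd).2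
    simp only [List.foldl_cons]
    by_cases hp : p k
    · rw [if_pos hp]
      have hkd : d.contains k = false := hfresh k (List.mem_cons_self ..)
      have hitems : (d.insert k (v k)).items = d.items ++ [(k, v k)] := by
        rw [PySem.Dict.items_insert_of_not_contains]
        exact hkd
      rw [ih hlnd (d.insert k (v k))
            (PySem.Dict.nodup_keys_insert d k (v k) hdk)
            (by
              intro k' hk'
              have hne : k' ≠ k := fun he => hkl (he ▸ hk')
              rw [PySem.Dict.contains_insert]
              simp [hne, hfresh k' (List.mem_cons_of_mem _ hk')]),
          hitems]
      simp [hp, List.append_assoc]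
    · rw [if_neg hp]
      rw [ih hlnd d hdk (fun k' hk' => hfresh k' (List.mem_cons_of_mem _ hk'))]
      simp [hp]

-- ===== VERDICT (by name: the statement is the Claim_ definition above) =====
theorem get_repeated_image_spec : Claim_equal_get_repeated_image := by
  intro full_beta_data ordering _
  simp only [Spec_get_repeated_image, get_repeated_image, get_repeated_image_alt]
  -- rewrite A's loop into a modify-fold over the swapped enumerate pairs
  have hstep :
      (PySem.List.pyRange 0 (PySem.List.len ordering) 1).foldl
        (fun d trial_id =>
          let img_id := PySem.List.pyGetD ordering trial_id 0
          if d.contains img_id = false then d.insert img_id [trial_id]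
          else d.modify img_id [] (fun v => v ++ [trial_id]))
        PySem.Dict.empty
      = ((PySem.List.enumerate ordering 0).map Prod.swap).foldl
          (fun d q => d.modify q.1 [] (fun v => v ++ [q.2])) PySem.Dict.empty := by
    rw [List.foldl_map]
    have e1 :
        (PySem.List.pyRange 0 (PySem.List.len ordering) 1).foldl
          (fun d trial_id =>
            let img_id := PySem.List.pyGetD ordering trial_id 0
            if d.contains img_id = false then d.insert img_id [trial_id]
            else d.modify img_id [] (fun v => v ++ [trial_id]))
          PySem.Dict.empty
        = (PySem.List.pyRange 0 (PySem.List.len ordering) 1).foldl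
            (fun d trial_id =>
              d.modify (PySem.List.pyGetD ordering trial_id 0) [] (fun v => v ++ [trial_id]))
            PySem.Dict.empty := by
      apply PySem.List.foldl_congr_mem
      intro d i _
      exact pv_step_eq d (PySem.List.pyGetD ordering i 0) i
    rw [e1]
    have := pv_foldl_range_enum
      (σ := PySem.Dict Int (List Int))
      (f := fun d i x => d.modify x [] (fun v => v ++ [i]))
      ordering 0 (fun i => PySem.List.pyGetD ordering i 0) PySem.Dict.empty
      (by
        intro k hk hk'
        simp only [zero_add]
        exact PySem.List.pyGetD_natCast ordering k 0 ▸ by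
          simp [hk])
    simpa [PySem.List.len] using this
  rw [hstep]
  have hB :
      ((PySem.List.dedup ordering).foldl
        (fun r img =>
          let idxs := ((PySem.List.enumerate ordering 0).filter (fun p => p.2 == img)).map (fun p => p.1)
          if idxs.length == 3 then r.insert img idxs else r)
        (PySem.Dict.empty : PySem.Dict Int (List Int))).items
      = ((PySem.List.dedup ordering).filter
            (fun k => (((PySem.List.enumerate ordering 0).filter (fun p => p.2 == k)).map (fun p => p.1)).length == 3)).map
          (fun k => (k, ((PySem.List.enumerate ordering 0).filter (fun p => p.2 == k)).map (fun p => p.1))) := by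
    have hbb := pv_b_items
      (fun k => (((PySem.List.enumerate ordering 0).filter (fun p => p.2 == k)).map (fun p => p.1)).length == 3)
      (fun k => ((PySem.List.enumerate ordering 0).filter (fun p => p.2 == k)).map (fun p => p.1))
      (PySem.List.dedup ordering) (PySem.List.nodup_dedup ordering) PySem.Dict.empty
      (by simp) (by intro k _; simp [PySem.Dict.contains_empty])
    simpa using hbb
  rw [hB]
  have hnd : (((PySem.List.enumerate ordering 0).map Prod.swap).foldl
      (fun d q => d.modify q.1 [] (fun v => v ++ [q.2])) PySem.Dict.empty).keys.Nodup := by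
    apply PySem.Dict.nodup_keys_foldl_modify_key
    simp
  have hkeys : (((PySem.List.enumerate ordering 0).map Prod.swap).foldl
      (fun d q => d.modify q.1 [] (fun v => v ++ [q.2])) PySem.Dict.empty).keys
      = PySem.List.dedup ordering := by
    rw [PySem.Dict.keys_foldl_modify_key]
    simp only [PySem.Dict.keys_empty, PySem.Set.update_nil_left, List.map_map]
    have e1 : List.map (Prod.fst ∘ Prod.swap) (PySem.List.enumerate ordering)
        = List.map (fun p => p.2) (PySem.List.enumerate ordering) :=
      List.map_congr_left (fun p _ => rfl)
    rw [e1, PySem.List.map_snd_enumerate]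
    simp
  have hA : (((PySem.List.enumerate ordering 0).map Prod.swap).foldl
      (fun d q => d.modify q.1 [] (fun v => v ++ [q.2])) PySem.Dict.empty).items
      = (PySem.List.dedup ordering).map
          (fun k => (k, ((PySem.List.enumerate ordering 0).filter (fun p => p.2 == k)).map (fun p => p.1))) := by
    rw [PySem.Dict.items_eq_map_keys _ hnd [], hkeys]
    apply List.map_congr_left
    intro k _
    rw [PySem.Dict.getD_foldl_modify_append]
    simp only [PySem.Dict.getD_empty, List.nil_append, List.filter_map, List.map_map]
    rfl
  rw [hA, List.filter_map]
  congr 1
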